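-- pv_equiv track=rewrite | github.com/PavcaHyx/hr-system | display.py | column_widths
-- ===== SOURCE A (Python) =====
-- def column_widths(table):
--     """
--     Get the minimum width for each column in a table
--     INPUTS:
--     table - 2 dimensional list of values
--     """
--     num_cols = len(table[0])
--     col_widths = {}
--     for col_num in range(num_cols):
--         column = extract_column(col_num, table)
--
--         col_width = len(max(column, key=len)) + 4
--         col_widths['w%d' % (col_num + 1)] = col_width
--     return col_widths
--
-- def extract_column(col_num, table):
--     """
--     Extract a list representing a column from 2
--     dimensional list
--     INPUTS:
--     col_num - determines which item in the row will be
--               extracted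
--     table -   2 dimensional list. Each inner list represents
--               one 1 row in the table
--     """
--     column = []
--     for row in table:
--         if len(row) - 1 >= col_num:
--             column.append(str(row[col_num]))
--     return column
-- ===== SOURCE B (Python) =====
-- def column_widths(table):
--     """
--     Get the minimum width for each column in a table
--     (single row-major pass keeping running per-column maxima)
--     """
--     num_cols = len(table[0])
--     maxlen = [0] * num_cols
--     for row in table:
--         maxlen = [max(m, len(str(row[i]))) if i < len(row) else m
--                   for i, m in enumerate(maxlen)]
--     return {'w%d' % (i + 1): maxlen[i] + 4 for i in range(num_cols)}
-- ===== Notes on version B (the rewrite author's own statement) =====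
-- stated objective: alternative
-- what changed: Replaces the column-major scheme (extract_column materializes each column, then max(column, key=len) per column) by a single row-major pass that keeps a running maximum length per column and builds the dict from those maxima; no column lists are materialized.
import Mathlib
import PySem

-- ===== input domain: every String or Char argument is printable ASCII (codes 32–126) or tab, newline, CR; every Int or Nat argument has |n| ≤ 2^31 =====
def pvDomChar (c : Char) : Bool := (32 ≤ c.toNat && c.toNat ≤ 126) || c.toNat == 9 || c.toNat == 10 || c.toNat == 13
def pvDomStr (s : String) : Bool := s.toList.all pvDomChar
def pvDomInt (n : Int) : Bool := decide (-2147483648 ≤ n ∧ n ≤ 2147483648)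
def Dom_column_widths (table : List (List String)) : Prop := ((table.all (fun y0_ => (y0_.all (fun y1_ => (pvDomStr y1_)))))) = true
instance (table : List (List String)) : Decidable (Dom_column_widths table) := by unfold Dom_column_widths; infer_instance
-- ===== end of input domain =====

-- B replaces A's column-major scheme (extract_column materializes each column, then
-- max(column, key=len) per column) by a single row-major pass keeping running per-column
-- maximum lengths (objective: alternative; no speed claim).


-- ===== PORT A =====
-- str(row[col_num]) is the identity on str cells; the guard ensures the index is in range,
-- so the total pyGetD is exact here.
def extract_column (col_num : Int) (table : List (List String)) : List String :=
  table.foldl (fun column row =>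
    if (row.length : Int) - 1 ≥ col_num then column ++ [PySem.List.pyGetD row col_num ""]
    else column) []

-- table[0] raises IndexError on an empty table (excluded by Pre_); max(column, key=len)
-- never sees an empty column (row 0 always contributes), so the .getD "" default is never used.
def column_widths (table : List (List String)) : List (String × Int) :=
  let num_cols : Nat := (PySem.List.pyGetD table 0 []).length
  ((PySem.List.pyRange 0 (num_cols : Int) 1).foldl
    (fun (d : PySem.Dict String Int) col_num =>
      let column := extract_column col_num table
      let col_width : Int := PySem.Str.len ((PySem.List.max? column PySem.Str.len).getD "") + 4
      d.insert ("w" ++ PySem.Int.toStr (col_num + 1)) col_width)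
    PySem.Dict.empty).items

-- ===== PORT B =====
-- one pass over the rows; maxlen holds the running per-column maximum lengths;
-- the final dict comprehension has pairwise-distinct keys, so its association list is the map.
def column_widths_alt (table : List (List String)) : List (String × Int) :=
  let num_cols : Nat := (PySem.List.pyGetD table 0 []).length
  let maxlen : List Int := table.foldl
    (fun m row => m.mapIdx (fun i mv =>
      if i < row.length then max mv (PySem.Str.len (row.getD i "")) else mv))
    (List.replicate num_cols 0)
  (PySem.List.pyRange 0 (num_cols : Int) 1).map
    (fun i => ("w" ++ PySem.Int.toStr (i + 1), PySem.List.pyGetD maxlen i 0 + 4))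

-- ===== PRECONDITION & SPEC =====
-- Pre_ excludes only the empty table, on which A's 'table[0]' raises IndexError.
def Pre_column_widths (table : List (List String)) : Prop := table ≠ []
instance (table : List (List String)) : Decidable (Pre_column_widths table) := by
  unfold Pre_column_widths; infer_instance

def pvWitness_column_widths : List (List String) := [["ab", "c"], ["defgh"]]

def Spec_column_widths (table : List (List String)) (out : List (String × Int)) : Prop := out = column_widths_alt table
instance (table : List (List String)) (out : List (String × Int)) : Decidable (Spec_column_widths table out) := by unfold Spec_column_widths; infer_instance

-- ===== CLAIM (what is proved, stated in full; the proofs are below) =====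
def Claim_equal_column_widths : Prop := ∀ (table : List (List String)), Dom_column_widths table → Pre_column_widths table → Spec_column_widths table (column_widths table)

-- ===== LEMMAS AND PROOFS =====

-- Nat.toDigitsCore ignores its accumulator up to appending it
theorem pv_tdc_shift (b : Nat) : ∀ (f n : Nat) (ds : List Char),
    Nat.toDigitsCore b f n ds = Nat.toDigitsCore b f n [] ++ ds := by
  intro f
  induction f with
  | zero => intro n ds; simp [Nat.toDigitsCore]
  | succ f ih =>
    intro n ds
    simp only [Nat.toDigitsCore]
    by_cases h : n / b = 0
    · simp [h]
    · simp only [h]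
      rw [ih (n / b) (Nat.digitChar (n % b) :: ds), ih (n / b) [Nat.digitChar (n % b)]]
      simp

-- toDigitsCore computes the reversed digit characters
theorem pv_tdc_digits : ∀ (f n : Nat), 0 < n → n < 10 ^ f →
    Nat.toDigitsCore 10 f n [] = ((Nat.digits 10 n).map Nat.digitChar).reverse := by
  intro f
  induction f with
  | zero => intro n hn h; omega
  | succ f ih =>
    intro n hn h
    rw [Nat.digits_def' (by norm_num : (1:Nat) < 10) hn]
    simp only [Nat.toDigitsCore]
    by_cases h0 : n / 10 = 0
    · rw [if_pos h0, h0, Nat.digits_zero]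
      simp
    · rw [if_neg h0]
      rw [pv_tdc_shift 10 f (n / 10) [Nat.digitChar (n % 10)]]
      rw [ih (n / 10) (Nat.pos_of_ne_zero h0) (by omega)]
      simp

theorem pv_digitChar_inj (a b : Nat) (ha : a < 10) (hb : b < 10)
    (h : Nat.digitChar a = Nat.digitChar b) : a = b := by
  interval_cases a <;> interval_cases b <;> simp_all [Nat.digitChar]

theorem pv_map_digitChar_inj : ∀ (l1 l2 : List Nat), (∀ x ∈ l1, x < 10) → (∀ x ∈ l2, x < 10) →
    l1.map Nat.digitChar = l2.map Nat.digitChar → l1 = l2 := by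
  intro l1
  induction l1 with
  | nil => intro l2 _ _ h; cases l2 <;> simp_all
  | cons a t ih =>
    intro l2 h1 h2 h
    cases l2 with
    | nil => simp_all
    | cons b t2 =>
      simp only [List.map_cons, List.cons.injEq] at h
      have := pv_digitChar_inj a b (h1 a (by simp)) (h2 b (by simp)) h.1
      subst this
      rw [ih t2 (fun x hx => h1 x (by simp [hx])) (fun x hx => h2 x (by simp [hx])) h.2]

theorem pv_self_lt_pow (n : Nat) : n < 10 ^ (n + 1) := by
  calc n < 2 ^ n := Nat.lt_two_pow_self
  _ ≤ 10 ^ n := Nat.pow_le_pow_left (by norm_num) n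
  _ ≤ 10 ^ (n + 1) := Nat.pow_le_pow_right (by norm_num) (by omega)

theorem pv_toDigits_pos (n : Nat) (hn : 0 < n) :
    Nat.toDigits 10 n = ((Nat.digits 10 n).map Nat.digitChar).reverse :=
  pv_tdc_digits (n + 1) n hn (pv_self_lt_pow n)

theorem pv_toDigits_ne_zero (n : Nat) (hn : 0 < n) : Nat.toDigits 10 n ≠ Nat.toDigits 10 0 := by
  intro h
  rw [pv_toDigits_pos n hn, show Nat.toDigits 10 0 = ['0'] from by decide] at h
  have h' : (Nat.digits 10 n).map Nat.digitChar = ['0'] := by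
    have := congrArg List.reverse h; simpa using this
  cases hdg : Nat.digits 10 n with
  | nil =>
    have := Nat.ofDigits_digits 10 n
    rw [hdg] at this; simp [Nat.ofDigits] at this; omega
  | cons d t =>
    rw [hdg] at h'
    cases t with
    | nil =>
      simp only [List.map_cons, List.map_nil, List.cons.injEq] at h'
      have hd10 : d < 10 := Nat.digits_lt_base (by norm_num)
        (show d ∈ Nat.digits 10 n by rw [hdg]; simp)
      have hd0 : d = 0 := pv_digitChar_inj d 0 hd10 (by norm_num) (by simpa using h'.1)
      have := Nat.ofDigits_digits 10 n
      rw [hdg, hd0] at this; simp [Nat.ofDigits] at this; omega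
    | cons => simp at h'

theorem pv_toDigits_inj (m n : Nat) (h : Nat.toDigits 10 m = Nat.toDigits 10 n) : m = n := by
  rcases Nat.eq_zero_or_pos m with hm | hm <;> rcases Nat.eq_zero_or_pos n with hn | hn
  · omega
  · exact absurd h.symm (pv_toDigits_ne_zero n hn ∘ (hm ▸ ·))
  · exact absurd h (pv_toDigits_ne_zero m hm ∘ (hn ▸ ·))
  · rw [pv_toDigits_pos m hm, pv_toDigits_pos n hn] at h
    have h1 := List.reverse_injective h
    have h2 := pv_map_digitChar_inj _ _ (fun x hx => Nat.digits_lt_base (by norm_num) hx)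
      (fun x hx => Nat.digits_lt_base (by norm_num) hx) h1
    have := congrArg (Nat.ofDigits 10) h2
    have hm' := Nat.ofDigits_digits 10 m
    have hn' := Nat.ofDigits_digits 10 n
    rw [hm', hn'] at this
    exact_mod_cast this

-- the keys 'w%d' % (i+1) are pairwise distinct for distinct nonnegative i
theorem pv_key_inj (a b : Int) (ha : 0 ≤ a) (hb : 0 ≤ b)
    (h : ("w" ++ PySem.Int.toStr (a + 1)) = ("w" ++ PySem.Int.toStr (b + 1))) : a = b := by
  have h1 : (PySem.Int.toStr (a + 1)).toList = (PySem.Int.toStr (b + 1)).toList := by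
    have := congrArg String.toList h
    simpa [String.toList_append] using this
  rw [PySem.Int.toList_toStr, PySem.Int.toList_toStr] at h1
  unfold PySem.Int.toChars at h1
  rw [if_neg (by omega), if_neg (by omega)] at h1
  have := pv_toDigits_inj _ _ h1
  omega

-- folding fresh-key inserts over a dict appends the pairs in order
theorem pv_items_foldl_insert (kf : Int → String) (vf : Int → Int) :
    ∀ (l : List Int) (d : PySem.Dict String Int),
    (∀ i ∈ l, d.contains (kf i) = false) →
    l.Pairwise (fun a b => kf a ≠ kf b) →
    (l.foldl (fun d i => d.insert (kf i) (vf i)) d).items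
      = d.items ++ l.map (fun i => (kf i, vf i)) := by
  intro l
  induction l with
  | nil => intro d _ _; simp
  | cons a t ih =>
    intro d hc hp
    simp only [List.foldl_cons, List.map_cons]
    rw [ih (d.insert (kf a) (vf a))
      (by
        intro i hi
        rw [PySem.Dict.contains_insert]
        have hne : kf i ≠ kf a := fun e => (List.pairwise_cons.mp hp).1 i hi e.symm
        simp [hne, hc i (by simp [hi])])
      (List.pairwise_cons.mp hp).2]
    rw [PySem.Dict.items_insert_of_not_contains d (vf a) (hc a (by simp))]
    simp

-- B's row step, named for the proofs below
def pvStep (m : List Int) (row : List String) : List Int :=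
  m.mapIdx (fun i mv => if i < row.length then max mv (PySem.Str.len (row.getD i "")) else mv)

theorem pv_getD_fold (table : List (List String)) : ∀ (m : List Int) (k : Nat), k < m.length →
    (table.foldl pvStep m).getD k 0
      = table.foldl (fun a row => if k < row.length then max a (PySem.Str.len (row.getD k "")) else a)
          (m.getD k 0) := by
  induction table with
  | nil => intro m k hk; simp
  | cons r rest ih =>
    intro m k hk
    rw [List.foldl_cons, List.foldl_cons, ih (pvStep m r) k (by simp [pvStep]; omega)]
    congr 1
    have h1 : (pvStep m r).getD k 0 = (pvStep m r)[k]'(by simp [pvStep]; omega) := by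
      rw [List.getD_eq_getElem]
    rw [h1]
    simp only [pvStep, List.getElem_mapIdx]
    rw [List.getD_eq_getElem m 0 hk]

-- len(max(x::t, key=len)) is the running maximum of the lengths
theorem pv_len_max?_cons : ∀ (t : List String) (x : String),
    PySem.Str.len ((PySem.List.max? (x :: t) PySem.Str.len).getD "")
    = t.foldl (fun a s => max a (PySem.Str.len s)) (PySem.Str.len x) := by
  intro t
  induction t with
  | nil => intro x; simp [PySem.List.max?]
  | cons s t ih =>
    intro x
    have hstep : PySem.List.max? (x :: s :: t) PySem.Str.len
        = PySem.List.max? ((if PySem.Str.len x < PySem.Str.len s then s else x) :: t)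
            PySem.Str.len := by
      unfold PySem.List.max?
      simp only [List.foldl_cons]
      split_ifs with h <;> simp_all
    rw [hstep, ih, List.foldl_cons]
    congr 1
    split_ifs with h
    · exact (max_eq_right (le_of_lt h)).symm
    · exact (max_eq_left (le_of_not_gt h)).symm

-- extract_column is the cells of the sufficiently long rows
theorem pv_column_eq (i : Int) (h0 : 0 ≤ i) (table : List (List String)) :
    extract_column i table
      = (table.filter (fun row => decide (i.toNat < row.length))).map (fun row => row.getD i.toNat "") := by
  unfold extract_column
  rw [show (fun (column : List String) (row : List String) =>
      if (row.length : Int) - 1 ≥ i then column ++ [PySem.List.pyGetD row i ""] else column)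
    = (fun column row =>
      if decide (i.toNat < row.length) = true then column ++ [row.getD i.toNat ""] else column) from ?_]
  · exact PySem.List.foldl_append_if _ _ table []
  · funext column row
    have he : ((row.length : Int) - 1 ≥ i) ↔ (i.toNat < row.length) := by omega
    by_cases h : i.toNat < row.length
    · rw [if_pos (he.mpr h), if_pos (by simp [h])]
      rw [show i = ((i.toNat : Nat) : Int) by omega, PySem.List.pyGetD_natCast,
        Int.toNat_natCast]
    · rw [if_neg (fun hh => h (he.mp hh)), if_neg (by simp [h])]

-- per-column agreement: A's len(max(column, key=len)) equals B's running column maximum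
theorem pv_column_value (r0 : List String) (rest : List (List String)) (i : Int)
    (h0 : 0 ≤ i) (hi : i.toNat < r0.length) :
    PySem.Str.len ((PySem.List.max? (extract_column i (r0 :: rest)) PySem.Str.len).getD "")
      = (r0 :: rest).foldl
          (fun a row => if i.toNat < row.length then max a (PySem.Str.len (row.getD i.toNat "")) else a)
          0 := by
  rw [pv_column_eq i h0]
  rw [List.filter_cons_of_pos (by simp [hi])]
  simp only [List.map_cons]
  rw [pv_len_max?_cons]
  rw [List.foldl_cons, if_pos hi]
  have hz : max (0 : Int) (PySem.Str.len (r0.getD i.toNat "")) = PySem.Str.len (r0.getD i.toNat "") := by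
    rw [max_eq_right]
    rw [PySem.Str.len_eq]
    positivity
  rw [hz]
  rw [List.foldl_map, List.foldl_filter]
  simp

-- ===== VERDICT (by name: the statement is the Claim_ definition above) =====
theorem column_widths_spec : Claim_equal_column_widths := by
  intro table _hdom hpre
  unfold Spec_column_widths
  obtain ⟨r0, rest, rfl⟩ : ∃ r0 rest, table = r0 :: rest := by
    cases table with
    | nil => exact absurd rfl hpre
    | cons a t => exact ⟨a, t, rfl⟩
  unfold column_widths column_widths_alt
  simp only [PySem.List.pyGetD_zero_cons]
  rw [pv_items_foldl_insert (fun i => "w" ++ PySem.Int.toStr (i + 1))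
    (fun i => PySem.Str.len ((PySem.List.max? (extract_column i (r0 :: rest)) PySem.Str.len).getD "") + 4)
    (PySem.List.pyRange 0 (r0.length : Int) 1) PySem.Dict.empty
    (fun i _ => by simp [pysem])
    (((PySem.List.nodup_pyRange_one 0 (r0.length : Int)).imp_of_mem ?_))]
  · show _ ++ _ = _
    rw [show (PySem.Dict.empty : PySem.Dict String Int).items = [] from rfl, List.nil_append]
    apply List.map_congr_left
    intro i hi
    have hmem := (PySem.List.mem_pyRange_one).mp hi
    have h0 : 0 ≤ i := hmem.1
    have hlt : i.toNat < r0.length := by omega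
    refine Prod.ext rfl ?_
    show PySem.Str.len ((PySem.List.max? (extract_column i (r0 :: rest)) PySem.Str.len).getD "") + 4
      = PySem.List.pyGetD ((r0 :: rest).foldl pvStep (List.replicate r0.length 0)) i 0 + 4
    congr 1
    have hB : PySem.List.pyGetD ((r0 :: rest).foldl pvStep (List.replicate r0.length 0)) i 0
        = ((r0 :: rest).foldl pvStep (List.replicate r0.length 0)).getD i.toNat 0 := by
      rw [show i = ((i.toNat : Nat) : Int) by omega, PySem.List.pyGetD_natCast, Int.toNat_natCast]
    rw [hB, pv_getD_fold _ _ _ (by simpa using hlt), pv_column_value r0 rest i h0 hlt]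
    congr 1
    simp [hlt]
  · intro a b ha hb hne
    have h0a : 0 ≤ a := ((PySem.List.mem_pyRange_one).mp ha).1
    have h0b : 0 ≤ b := ((PySem.List.mem_pyRange_one).mp hb).1
    exact fun e => hne (pv_key_inj a b h0a h0b e)
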